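-- pv_equiv track=rewrite | github.com/jrpalmieri/UERANSIM-Handover | tools/pcap_analysis/core_packet_counts.py | compute_derived
-- ===== SOURCE A (Python) =====
-- PairCounts = dict[tuple[str, str], int]   # canonical (labelA, labelB) → count
--
-- _DERIVED_EXCLUDE_PAIRS = frozenset({("AMF", "SMF"), ("SMF", "UPF")})
--
-- def compute_derived(counts: PairCounts) -> dict[str, int]:
--     """Return AMF_GNB, Other_Relevant, and Total_Avg aggregates from raw pair counts."""
--     amf_gnb = sum(
--         n for (a, b), n in counts.items()
--         if "AMF" in (a, b) and (a.startswith("GNB") or b.startswith("GNB"))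
--     )
--     other_relevant = sum(
--         n for (a, b), n in counts.items()
--         if "NRF" not in (a, b)
--         and not a.startswith("GNB") and not b.startswith("GNB")
--         and (a, b) not in _DERIVED_EXCLUDE_PAIRS
--     )
--     amf_smf = counts.get(("AMF", "SMF"), 0)
--     smf_upf = counts.get(("SMF", "UPF"), 0)
--     return {
--         "AMF_GNB":       amf_gnb,
--         "Other_Relevant": other_relevant,
--         "Total_Avg":     amf_gnb + other_relevant + amf_smf + smf_upf,
--     }
-- ===== SOURCE B (Python) =====
-- _DERIVED_EXCLUDE_PAIRS = frozenset({("AMF", "SMF"), ("SMF", "UPF")})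
--
-- def compute_derived(counts):
--     """Complement arithmetic: Other_Relevant = total - irrelevant - excluded,
--     Total_Avg = amf_gnb + total - irrelevant; no relevance filter, no lookups."""
--     total = irrelevant = excluded = amf_gnb = 0
--     for (a, b), n in counts.items():
--         total += n
--         if "NRF" in (a, b) or a.startswith("GNB") or b.startswith("GNB"):
--             irrelevant += n
--         if (a, b) in _DERIVED_EXCLUDE_PAIRS:
--             excluded += n
--         if "AMF" in (a, b) and (a.startswith("GNB") or b.startswith("GNB")):
--             amf_gnb += n
--     return {
--         "AMF_GNB":        amf_gnb,
--         "Other_Relevant": total - irrelevant - excluded,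
--         "Total_Avg":      amf_gnb + total - irrelevant,
--     }
-- ===== Notes on version B (the rewrite author's own statement) =====
-- stated objective: alternative
-- what changed: B computes Other_Relevant and Total_Avg by complement arithmetic (grand total minus irrelevant and excluded sums) in one pass, instead of A's direct conjunctive relevance filter plus two dict lookups.
import Mathlib
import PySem

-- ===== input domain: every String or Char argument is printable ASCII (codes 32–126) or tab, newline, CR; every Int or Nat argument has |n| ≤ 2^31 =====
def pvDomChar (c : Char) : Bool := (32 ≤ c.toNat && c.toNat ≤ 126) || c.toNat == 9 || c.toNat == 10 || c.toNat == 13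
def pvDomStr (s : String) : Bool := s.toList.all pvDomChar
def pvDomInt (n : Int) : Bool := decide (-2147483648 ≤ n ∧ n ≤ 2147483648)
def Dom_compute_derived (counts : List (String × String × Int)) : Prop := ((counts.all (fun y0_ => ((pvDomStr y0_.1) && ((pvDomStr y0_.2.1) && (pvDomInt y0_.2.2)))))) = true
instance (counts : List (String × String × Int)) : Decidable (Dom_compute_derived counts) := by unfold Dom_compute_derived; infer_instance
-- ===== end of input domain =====

-- B derives Other_Relevant and Total_Avg by subtraction from the grand total (complement arithmetic) in one pass, instead of A's direct relevance filter plus two lookups (objective: alternative, same O(n) cost).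

-- ===== PORT A =====
-- first-match lookup with default 0: counts.get((k1, k2), 0)
def cdGet : List (String × String × Int) → String → String → Int
  | [], _, _ => 0
  | (a, b, n) :: t, k1, k2 => if a == k1 && b == k2 then n else cdGet t k1 k2

def compute_derived (counts : List (String × String × Int)) : List (String × Int) :=
  let amf_gnb := counts.foldl (fun acc x =>
      if (x.1 == "AMF" || x.2.1 == "AMF")
         && (PySem.Str.startswith x.1 "GNB" || PySem.Str.startswith x.2.1 "GNB")
      then acc + x.2.2 else acc) 0
  let other_relevant := counts.foldl (fun acc x =>
      if !(x.1 == "NRF" || x.2.1 == "NRF")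
         && !PySem.Str.startswith x.1 "GNB" && !PySem.Str.startswith x.2.1 "GNB"
         && !((x.1 == "AMF" && x.2.1 == "SMF") || (x.1 == "SMF" && x.2.1 == "UPF"))
      then acc + x.2.2 else acc) 0
  let amf_smf := cdGet counts "AMF" "SMF"
  let smf_upf := cdGet counts "SMF" "UPF"
  [("AMF_GNB", amf_gnb), ("Other_Relevant", other_relevant),
   ("Total_Avg", amf_gnb + other_relevant + amf_smf + smf_upf)]

-- ===== PORT B =====
-- the single pass of Source B; state = (total, irrelevant, excluded, amf_gnb), each updated independently
def cdPass : List (String × String × Int) → Int × Int × Int × Int → Int × Int × Int × Int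
  | [], st => st
  | (a, b, n) :: t, (tot, irr, exc, g) =>
    let tot := tot + n
    let irr := if a == "NRF" || b == "NRF" || PySem.Str.startswith a "GNB" || PySem.Str.startswith b "GNB"
               then irr + n else irr
    let exc := if (a == "AMF" && b == "SMF") || (a == "SMF" && b == "UPF")
               then exc + n else exc
    let g := if (a == "AMF" || b == "AMF") && (PySem.Str.startswith a "GNB" || PySem.Str.startswith b "GNB")
             then g + n else g
    cdPass t (tot, irr, exc, g)

def compute_derived_alt (counts : List (String × String × Int)) : List (String × Int) :=
  let st := cdPass counts (0, 0, 0, 0)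
  [("AMF_GNB", st.2.2.2), ("Other_Relevant", st.1 - st.2.1 - st.2.2.1),
   ("Total_Avg", st.2.2.2 + st.1 - st.2.1)]

-- ===== PRECONDITION & SPEC =====
-- Pre_ excludes association lists whose (a, b) keys repeat: they represent no Python dict
-- (dict keys are unique), so A's items()/get() behaviour on them is not defined by the source.
def Pre_compute_derived (counts : List (String × String × Int)) : Prop :=
  (counts.map (fun x => (x.1, x.2.1))).Nodup
instance (counts : List (String × String × Int)) : Decidable (Pre_compute_derived counts) := by
  unfold Pre_compute_derived; infer_instance

def pvWitness_compute_derived : (List (String × String × Int)) :=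
  [("AMF", "SMF", 3), ("UE", "UPF", 1), ("AMF", "GNB1", 2)]

def Spec_compute_derived (counts : List (String × String × Int)) (out : List (String × Int)) : Prop := out = compute_derived_alt counts
instance (counts : List (String × String × Int)) (out : List (String × Int)) : Decidable (Spec_compute_derived counts out) := by unfold Spec_compute_derived; infer_instance

-- ===== CLAIM (what is proved, stated in full; the proofs are below) =====
def Claim_equal_compute_derived : Prop := ∀ (counts : List (String × String × Int)), Dom_compute_derived counts → Pre_compute_derived counts → Spec_compute_derived counts (compute_derived counts)

-- ===== LEMMAS AND PROOFS =====

-- per-element contributions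
def cG (x : String × String × Int) : Int :=
  if (x.1 == "AMF" || x.2.1 == "AMF")
     && (PySem.Str.startswith x.1 "GNB" || PySem.Str.startswith x.2.1 "GNB")
  then x.2.2 else 0
def cO (x : String × String × Int) : Int :=
  if !(x.1 == "NRF" || x.2.1 == "NRF")
     && !PySem.Str.startswith x.1 "GNB" && !PySem.Str.startswith x.2.1 "GNB"
     && !((x.1 == "AMF" && x.2.1 == "SMF") || (x.1 == "SMF" && x.2.1 == "UPF"))
  then x.2.2 else 0
def cS (x : String × String × Int) : Int :=
  if x.1 == "AMF" && x.2.1 == "SMF" then x.2.2 else 0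
def cU (x : String × String × Int) : Int :=
  if x.1 == "SMF" && x.2.1 == "UPF" then x.2.2 else 0
def cI (x : String × String × Int) : Int :=
  if x.1 == "NRF" || x.2.1 == "NRF" || PySem.Str.startswith x.1 "GNB" || PySem.Str.startswith x.2.1 "GNB"
  then x.2.2 else 0
def cE (x : String × String × Int) : Int :=
  if (x.1 == "AMF" && x.2.1 == "SMF") || (x.1 == "SMF" && x.2.1 == "UPF") then x.2.2 else 0

def sumBy (f : String × String × Int → Int) : List (String × String × Int) → Int
  | [] => 0
  | x :: t => f x + sumBy f t

lemma foldl_if_sum (c : String × String × Int → Bool)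
    (l : List (String × String × Int)) (acc : Int) :
    l.foldl (fun a x => if c x then a + x.2.2 else a) acc
      = acc + sumBy (fun x => if c x then x.2.2 else 0) l := by
  induction l generalizing acc with
  | nil => simp [sumBy]
  | cons x t ih =>
    by_cases hc : c x = true <;> simp [List.foldl, sumBy, hc, ih] <;> ring

lemma if_add_shift (c : Prop) [Decidable c] (i n : Int) :
    (if c then i + n else i) = i + (if c then n else 0) := by
  split_ifs <;> simp

lemma cdPass_eq (l : List (String × String × Int)) (t i e g : Int) :
    cdPass l (t, i, e, g)
      = (t + sumBy (fun x => x.2.2) l, i + sumBy cI l, e + sumBy cE l, g + sumBy cG l) := by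
  induction l generalizing t i e g with
  | nil => simp [cdPass, sumBy]
  | cons x tl ih =>
    obtain ⟨a, b, n⟩ := x
    rw [cdPass]
    simp only [if_add_shift]
    rw [ih]
    simp only [sumBy, cI, cE, cG, Prod.mk.injEq]
    refine ⟨by ring, by ring, by ring, by ring⟩

-- exclude pairs are neither NRF nor GNB-prefixed: pointwise inclusion-exclusion
lemma cO_eq (x : String × String × Int) : cO x = x.2.2 - cI x - cE x := by
  obtain ⟨a, b, n⟩ := x
  simp only [cO, cI, cE]
  cases hE : ((a == "AMF" && b == "SMF") || (a == "SMF" && b == "UPF")) with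
  | true =>
    rcases Bool.or_eq_true_iff.mp hE with h | h
    · have ha : a = "AMF" := by simpa using (Bool.and_eq_true_iff.mp h).1
      have hb : b = "SMF" := by simpa using (Bool.and_eq_true_iff.mp h).2
      subst ha; subst hb
      have e2 : (("AMF" : String) == "NRF" || ("SMF" : String) == "NRF"
          || PySem.Str.startswith "AMF" "GNB" || PySem.Str.startswith "SMF" "GNB") = false := by decide
      rw [e2]; simp
    · have ha : a = "SMF" := by simpa using (Bool.and_eq_true_iff.mp h).1
      have hb : b = "UPF" := by simpa using (Bool.and_eq_true_iff.mp h).2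
      subst ha; subst hb
      have e2 : (("SMF" : String) == "NRF" || ("UPF" : String) == "NRF"
          || PySem.Str.startswith "SMF" "GNB" || PySem.Str.startswith "UPF" "GNB") = false := by decide
      rw [e2]; simp
  | false =>
    cases hI : (a == "NRF" || b == "NRF" || PySem.Str.startswith a "GNB" || PySem.Str.startswith b "GNB") with
    | true =>
      have h0 : (!(a == "NRF" || b == "NRF") && !PySem.Str.startswith a "GNB"
          && !PySem.Str.startswith b "GNB" && !(false : Bool)) = false := by
        rcases Bool.or_eq_true_iff.mp hI with h2 | h
        · rcases Bool.or_eq_true_iff.mp h2 with h3 | h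
          · rcases Bool.or_eq_true_iff.mp h3 with h | h
            · simp [h]
            · simp [PySem.Str.startswith] at h; simp [h]
          · simp [PySem.Str.startswith] at h; simp [h]
        · simp [PySem.Str.startswith] at h; simp [h]
      rw [h0]; simp
    | false =>
      simp only [Bool.or_eq_false_iff] at hI
      obtain ⟨⟨⟨hn1, hn2⟩, hs1⟩, hs2⟩ := hI
      simp [PySem.Str.startswith] at hs1 hs2
      simp [hn1, hn2, hs1, hs2]

lemma cE_eq (x : String × String × Int) : cE x = cS x + cU x := by
  obtain ⟨a, b, n⟩ := x
  simp only [cE, cS, cU]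
  cases h1 : (a == "AMF" && b == "SMF") with
  | true =>
    have ha : a = "AMF" := by simpa using (Bool.and_eq_true_iff.mp h1).1
    subst ha
    have e : (("AMF" : String) == "SMF") = false := by decide
    have h2 : (("AMF" : String) == "SMF" && b == "UPF") = false := by rw [e]; simp
    rw [h2]; simp
  | false =>
    cases h2 : (a == "SMF" && b == "UPF") <;> simp

lemma sumBy_sub (l : List (String × String × Int)) :
    sumBy cO l = sumBy (fun x => x.2.2) l - sumBy cI l - sumBy cE l := by
  induction l with
  | nil => simp [sumBy]
  | cons x t ih => simp only [sumBy, ih, cO_eq]; ring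

lemma sumBy_cE_split (l : List (String × String × Int)) :
    sumBy cE l = sumBy cS l + sumBy cU l := by
  induction l with
  | nil => simp [sumBy]
  | cons x t ih => simp only [sumBy, ih, cE_eq]; ring

lemma sumS_zero (l : List (String × String × Int))
    (h : ∀ x ∈ l, ¬(x.1 = "AMF" ∧ x.2.1 = "SMF")) : sumBy cS l = 0 := by
  induction l with
  | nil => rfl
  | cons x t ih =>
    have hx := h x (List.mem_cons_self ..)
    have ht := ih (fun y hy => h y (List.mem_cons_of_mem _ hy))
    simp [sumBy, cS, ht]
    intro h1 h2; exact (hx ⟨h1, h2⟩).elim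

lemma sumU_zero (l : List (String × String × Int))
    (h : ∀ x ∈ l, ¬(x.1 = "SMF" ∧ x.2.1 = "UPF")) : sumBy cU l = 0 := by
  induction l with
  | nil => rfl
  | cons x t ih =>
    have hx := h x (List.mem_cons_self ..)
    have ht := ih (fun y hy => h y (List.mem_cons_of_mem _ hy))
    simp [sumBy, cU, ht]
    intro h1 h2; exact (hx ⟨h1, h2⟩).elim

lemma cdGet_S (l : List (String × String × Int))
    (h : (l.map (fun x => (x.1, x.2.1))).Nodup) :
    cdGet l "AMF" "SMF" = sumBy cS l := by
  induction l with
  | nil => rfl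
  | cons x t ih =>
    obtain ⟨a, b, n⟩ := x
    rw [List.map_cons, List.nodup_cons] at h
    obtain ⟨hnm, hnd⟩ := h
    by_cases hk : a = "AMF" ∧ b = "SMF"
    · obtain ⟨ha, hb⟩ := hk; subst ha; subst hb
      have hz : ∀ y ∈ t, ¬(y.1 = "AMF" ∧ y.2.1 = "SMF") := by
        intro y hy hc
        have hmem : (y.1, y.2.1) ∈ t.map (fun x => (x.1, x.2.1)) :=
          List.mem_map_of_mem (f := fun x => (x.1, x.2.1)) hy
        rw [hc.1, hc.2] at hmem
        exact hnm hmem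
      simp [cdGet, sumBy, cS, sumS_zero t hz]
    · have hne : (a == "AMF" && b == "SMF") = false := by
        simp; intro h1; simp [h1] at hk; exact hk
      simp [cdGet, hne, sumBy, cS, ih hnd]

lemma cdGet_U (l : List (String × String × Int))
    (h : (l.map (fun x => (x.1, x.2.1))).Nodup) :
    cdGet l "SMF" "UPF" = sumBy cU l := by
  induction l with
  | nil => rfl
  | cons x t ih =>
    obtain ⟨a, b, n⟩ := x
    rw [List.map_cons, List.nodup_cons] at h
    obtain ⟨hnm, hnd⟩ := h
    by_cases hk : a = "SMF" ∧ b = "UPF"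
    · obtain ⟨ha, hb⟩ := hk; subst ha; subst hb
      have hz : ∀ y ∈ t, ¬(y.1 = "SMF" ∧ y.2.1 = "UPF") := by
        intro y hy hc
        have hmem : (y.1, y.2.1) ∈ t.map (fun x => (x.1, x.2.1)) :=
          List.mem_map_of_mem (f := fun x => (x.1, x.2.1)) hy
        rw [hc.1, hc.2] at hmem
        exact hnm hmem
      simp [cdGet, sumBy, cU, sumU_zero t hz]
    · have hne : (a == "SMF" && b == "UPF") = false := by
        simp; intro h1; simp [h1] at hk; exact hk
      simp [cdGet, hne, sumBy, cU, ih hnd]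

-- ===== VERDICT (by name: the statement is the Claim_ definition above) =====
theorem compute_derived_spec : Claim_equal_compute_derived := by
  intro counts _ hpre
  show compute_derived counts = compute_derived_alt counts
  simp only [compute_derived, compute_derived_alt]
  rw [cdPass_eq, foldl_if_sum _ counts 0, foldl_if_sum _ counts 0,
      cdGet_S counts hpre, cdGet_U counts hpre]
  simp only [zero_add]
  have hO : sumBy cO counts = sumBy (fun x => x.2.2) counts - sumBy cI counts - sumBy cE counts :=
    sumBy_sub counts
  have hE : sumBy cE counts = sumBy cS counts + sumBy cU counts := sumBy_cE_split counts
  show [("AMF_GNB", sumBy cG counts), ("Other_Relevant", sumBy cO counts),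
        ("Total_Avg", sumBy cG counts + sumBy cO counts + sumBy cS counts + sumBy cU counts)]
     = [("AMF_GNB", sumBy cG counts),
        ("Other_Relevant", sumBy (fun x => x.2.2) counts - sumBy cI counts - sumBy cE counts),
        ("Total_Avg", sumBy cG counts + sumBy (fun x => x.2.2) counts - sumBy cI counts)]
  rw [hO, hE]; norm_num; ring
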